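-- pv_equiv track=rewrite | github.com/christopherdean11/sudoku | test_puzzle.py | make_test_puzzle
-- ===== SOURCE A (Python) =====
-- def make_test_puzzle(mode: str, zero_slant: bool) -> list:
--     """
--     generate a false puzzle to prove functions work
--     :param mode: str - seqrow for sequential rows (1-9 for each row)
--                        flatrow for same value in each row (1, 1, ...)
--     :param zero_slant: bool - true places a diagonal 0 from top left to bot. right
--     :return: puzzle as a list
--     """
--     test_puzzle = []
--
--     # seqrow for sequential row, i.e. 1-9 on each row
--     if mode=='seqrow':
--         for _ in range(1, 10):
--             test_puzzle.append([y for y in range(1, 10)])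
--
--     # flat row = each row is same value, i.e. all 1 then all 2 ...
--     elif mode == 'flatrow':
--         for x in range(1, 10):
--             test_puzzle.append([x for _ in range(1, 10)])
--
--     if zero_slant:
--         for i, x in enumerate(test_puzzle):
--             x[i] = 0
--
--     return test_puzzle
-- ===== SOURCE B (Python) =====
-- def make_test_puzzle(mode: str, zero_slant: bool) -> list:
--     # Build the 81 cells as one flat 1-D list (row-major), then reshape into 9 rows.
--     if mode == 'seqrow':
--         base = lambda i, j: j + 1
--     elif mode == 'flatrow':
--         base = lambda i, j: i + 1
--     else:
--         return []
--     flat = []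
--     for k in range(81):
--         i, j = divmod(k, 9)
--         flat.append(0 if (zero_slant and i == j) else base(i, j))
--     return [flat[9 * r:9 * r + 9] for r in range(9)]
-- ===== Notes on version B (the rewrite author's own statement) =====
-- stated objective: alternative
-- what changed: B computes the 81 cells as one flat row-major 1-D list indexed by divmod(k,9), deciding each cell (0 on the diagonal, else column- or row-based value) directly, and then reshapes the flat list into 9 rows by slicing, instead of A's per-mode nested row building followed by a second diagonal-patching pass.
import Mathlib
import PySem

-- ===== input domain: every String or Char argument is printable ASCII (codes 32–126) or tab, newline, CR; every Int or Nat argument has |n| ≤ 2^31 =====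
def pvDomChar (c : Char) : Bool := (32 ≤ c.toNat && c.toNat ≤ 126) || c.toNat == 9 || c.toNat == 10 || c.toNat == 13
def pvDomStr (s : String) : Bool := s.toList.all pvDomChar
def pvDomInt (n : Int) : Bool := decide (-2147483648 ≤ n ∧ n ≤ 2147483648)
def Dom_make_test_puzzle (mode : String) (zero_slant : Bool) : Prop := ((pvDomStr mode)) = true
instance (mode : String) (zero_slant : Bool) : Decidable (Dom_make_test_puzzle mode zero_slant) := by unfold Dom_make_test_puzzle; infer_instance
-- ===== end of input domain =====

-- B builds the 81 cells as one flat row-major list (index arithmetic via divmod) and reshapes it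
-- into 9 rows by slicing, instead of A's nested row building plus a diagonal-patching pass; objective: alternative.

-- ===== PORT A =====
-- literal transliteration of A: build rows per mode, then (if zero_slant) set x[i] = 0 for each enumerated row
def make_test_puzzle (mode : String) (zero_slant : Bool) : List (List Int) :=
  let test_puzzle : List (List Int) :=
    if mode == "seqrow" then
      (PySem.List.pyRange 1 10 1).foldl (fun acc _ => acc ++ [(PySem.List.pyRange 1 10 1)]) []
    else if mode == "flatrow" then
      (PySem.List.pyRange 1 10 1).foldl (fun acc x => acc ++ [(PySem.List.pyRange 1 10 1).map (fun _ => x)]) []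
    else []
  if zero_slant then
    test_puzzle.mapIdx (fun i x => x.set i 0)   -- x[i] = 0 for i, x in enumerate(test_puzzle)
  else test_puzzle

-- ===== PORT B =====
-- transliteration of Source B: flat 81-cell list built by a fold over range(81) with divmod, then sliced into rows
def make_test_puzzle_alt (mode : String) (zero_slant : Bool) : List (List Int) :=
  if mode == "seqrow" ∨ mode == "flatrow" then
    let base : Int → Int → Int :=
      if mode == "seqrow" then (fun _ j => j + 1) else (fun i _ => i + 1)
    let flat : List Int :=
      (PySem.List.pyRange 0 81 1).foldl (fun acc k =>
        let i := PySem.Int.floordiv k 9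
        let j := PySem.Int.mod k 9
        acc ++ [if zero_slant && i == j then 0 else base i j]) []
    (PySem.List.pyRange 0 9 1).map (fun r => PySem.List.slice flat (some ((9:Int) * r)) (some ((9:Int) * r + 9)))
  else []

-- ===== PRECONDITION & SPEC =====
def Spec_make_test_puzzle (mode : String) (zero_slant : Bool) (out : List (List Int)) : Prop := out = make_test_puzzle_alt mode zero_slant
instance (mode : String) (zero_slant : Bool) (out : List (List Int)) : Decidable (Spec_make_test_puzzle mode zero_slant out) := by unfold Spec_make_test_puzzle; infer_instance

-- ===== CLAIM =====
def Claim_equal_make_test_puzzle : Prop := ∀ (mode : String) (zero_slant : Bool), Dom_make_test_puzzle mode zero_slant → Spec_make_test_puzzle mode zero_slant (make_test_puzzle mode zero_slant)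

-- ===== LEMMAS AND PROOFS =====

-- ===== VERDICT =====
theorem make_test_puzzle_spec : Claim_equal_make_test_puzzle := by
  intro mode zero_slant _
  unfold Spec_make_test_puzzle make_test_puzzle make_test_puzzle_alt
  by_cases hs : mode == "seqrow" <;> by_cases hf : mode == "flatrow" <;>
    simp only [hs, hf] <;> cases zero_slant <;> decide
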